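-- pv_equiv track=rewrite | github.com/GGaldino95/trybe-course | projects/modulo_4/bloco_37/sd-09-restaurant-orders/src/analyze_log.py | find_days_never_went
-- ===== SOURCE A (Python) =====
-- def find_days_never_went(orders, customer):
--     all_days = set()
--     customer_days = set()
--
--     for order in orders:
--         all_days.add(order[2])
--         if order[0] == customer:
--             customer_days.add(order[2])
--
--     return all_days.difference(customer_days)
-- ===== SOURCE B (Python) =====
-- def find_days_never_went(orders, customer):
--     by_day = {}
--     for order in orders:
--         by_day.setdefault(order[2], set()).add(order[0])
--     return {day for day, custs in by_day.items() if customer not in custs}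
-- ===== Notes on version B (the rewrite author's own statement) =====
-- stated objective: alternative
-- what changed: Replaces A's two running sets (all days, customer's days) and final set difference with a two-phase index-then-filter: one pass builds a dict mapping each day to the set of customers who ordered that day, then a set comprehension keeps the days whose customer set misses the target customer.
import Mathlib
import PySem

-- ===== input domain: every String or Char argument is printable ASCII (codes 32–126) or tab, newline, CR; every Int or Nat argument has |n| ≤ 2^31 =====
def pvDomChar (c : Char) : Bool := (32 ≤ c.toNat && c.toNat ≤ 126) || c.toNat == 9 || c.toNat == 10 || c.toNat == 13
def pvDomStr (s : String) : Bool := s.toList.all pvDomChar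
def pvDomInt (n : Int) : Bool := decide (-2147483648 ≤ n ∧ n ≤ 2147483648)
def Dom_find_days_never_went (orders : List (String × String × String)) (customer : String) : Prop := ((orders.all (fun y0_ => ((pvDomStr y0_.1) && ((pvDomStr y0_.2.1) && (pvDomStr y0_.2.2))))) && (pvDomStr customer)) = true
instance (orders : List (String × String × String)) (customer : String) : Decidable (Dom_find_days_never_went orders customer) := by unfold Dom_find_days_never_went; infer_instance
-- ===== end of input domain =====

-- B replaces A's two-running-sets-then-difference with a two-phase index-then-filter:
-- one pass groups customers by day into a dict, then the days whose customer set misses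
-- `customer` are collected; equal cost, different decomposition ('alternative').
-- ===== PORT A =====
def find_days_never_went (orders : List (String × String × String)) (customer : String) : List String :=
  let st := orders.foldl
    (fun (st : PySem.Set String × PySem.Set String) order =>
      let all_days := PySem.Set.add st.1 order.2.2
      let customer_days := if order.1 == customer then PySem.Set.add st.2 order.2.2 else st.2
      (all_days, customer_days))
    (PySem.Set.empty, PySem.Set.empty)
  PySem.Set.diff st.1 st.2

-- ===== PORT B =====
def find_days_never_went_alt (orders : List (String × String × String)) (customer : String) : List String :=
  let by_day := orders.foldl
    (fun (d : PySem.Dict String (PySem.Set String)) order =>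
      d.insert order.2.2 (PySem.Set.add (d.getD order.2.2 PySem.Set.empty) order.1))
    PySem.Dict.empty
  PySem.Set.ofList ((by_day.items.filter (fun p => !(PySem.Set.contains p.2 customer))).map (·.1))

-- ===== PRECONDITION & SPEC =====
def Spec_find_days_never_went (orders : List (String × String × String)) (customer : String) (out : List String) : Prop := out = find_days_never_went_alt orders customer
instance (orders : List (String × String × String)) (customer : String) (out : List String) : Decidable (Spec_find_days_never_went orders customer out) := by unfold Spec_find_days_never_went; infer_instance

-- ===== CLAIM (what is proved, stated in full; the proofs are below) =====
def Claim_equal_find_days_never_went : Prop := ∀ (orders : List (String × String × String)) (customer : String), Dom_find_days_never_went orders customer → Spec_find_days_never_went orders customer (find_days_never_went orders customer)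

-- ===== LEMMAS AND PROOFS =====

-- membership in a Set after add, as a Bool equation
lemma contains_add_eq (s : PySem.Set String) (x y : String) :
    PySem.Set.contains (PySem.Set.add s x) y = (y == x || PySem.Set.contains s y) := by
  simp [PySem.Set.add_eq_ite]
  by_cases hxy : y = x <;> by_cases hxs : x ∈ s <;> simp [hxy, hxs]

-- keys of a filtered items list, given distinct keys: filtering items then projecting keys
-- equals filtering the key list by the looked-up value
lemma filter_items_key (customer : String) :
    ∀ (l : List (String × PySem.Set String)), (l.map (·.1)).Nodup →
      (l.map (·.1)).filter
          (fun k => !(PySem.Set.contains ((PySem.Dict.mk l).getD k PySem.Set.empty) customer))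
        = (l.filter (fun p => !(PySem.Set.contains p.2 customer))).map (·.1)
  | [], _ => rfl
  | (k, v) :: rest, hnd => by
    rw [List.map_cons, List.nodup_cons] at hnd
    obtain ⟨hk, hnd'⟩ := hnd
    have hstep : ∀ k' ∈ rest.map (·.1),
        (!(PySem.Set.contains ((PySem.Dict.mk ((k, v) :: rest)).getD k' PySem.Set.empty) customer))
          = (!(PySem.Set.contains ((PySem.Dict.mk rest).getD k' PySem.Set.empty) customer)) := by
      intro k' hk'
      have hne : (k == k') = false := by
        refine beq_eq_false_iff_ne.mpr ?_
        rintro rfl; exact hk hk'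
      simp [PySem.Dict.getD_eq_get?_getD, PySem.Dict.get?_mk_cons, hne]
    have hhead :
        (PySem.Dict.mk ((k, v) :: rest)).getD k PySem.Set.empty = v := by
      simp [PySem.Dict.getD_eq_get?_getD, PySem.Dict.get?_mk_cons]
    simp only [List.map_cons, List.filter_cons, hhead]
    rw [List.filter_congr hstep, filter_items_key customer rest hnd']
    by_cases hv : customer ∈ v <;> simp [hv]

-- the fold invariant: A's pair of sets and B's dict stay in step, and the final
-- expressions agree
lemma main_invariant (customer : String) :
    ∀ (orders : List (String × String × String))
      (all cust : PySem.Set String) (d : PySem.Dict String (PySem.Set String)),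
      all = d.keys → d.keys.Nodup →
      (∀ day, PySem.Set.contains cust day
          = PySem.Set.contains (d.getD day PySem.Set.empty) customer) →
      PySem.Set.diff
          (orders.foldl
            (fun (st : PySem.Set String × PySem.Set String) order =>
              let all_days := PySem.Set.add st.1 order.2.2
              let customer_days := if order.1 == customer then PySem.Set.add st.2 order.2.2 else st.2
              (all_days, customer_days)) (all, cust)).1
          (orders.foldl
            (fun (st : PySem.Set String × PySem.Set String) order =>
              let all_days := PySem.Set.add st.1 order.2.2
              let customer_days := if order.1 == customer then PySem.Set.add st.2 order.2.2 else st.2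
              (all_days, customer_days)) (all, cust)).2
      = PySem.Set.ofList
          (((orders.foldl
              (fun (d : PySem.Dict String (PySem.Set String)) order =>
                d.insert order.2.2 (PySem.Set.add (d.getD order.2.2 PySem.Set.empty) order.1)) d).items.filter
            (fun p => !(PySem.Set.contains p.2 customer))).map (·.1))
  | [], all, cust, d, hkeys, hnd, hcust => by
    simp only [List.foldl_nil]
    have hfilter : PySem.Set.diff all cust
        = (d.items.map (·.1)).filter
            (fun k => !(PySem.Set.contains ((PySem.Dict.mk d.items).getD k PySem.Set.empty) customer)) := by
      have : PySem.Set.diff all cust = all.filter (fun x => !(PySem.Set.contains cust x)) := rfl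
      rw [this, hkeys]
      exact List.filter_congr (fun k _ => by rw [hcust k])
    have hndk : (d.items.map (·.1)).Nodup := hnd
    rw [hfilter, filter_items_key customer d.items hndk]
    refine Eq.symm (PySem.Set.ofList_eq_self_of_nodup _ ?_)
    exact hndk.sublist (List.Sublist.map (fun p : String × PySem.Set String => p.1) List.filter_sublist)
  | o :: rest, all, cust, d, hkeys, hnd, hcust => by
    simp only [List.foldl_cons]
    refine main_invariant customer rest _ _ _ ?_ (PySem.Dict.nodup_keys_insert _ _ _ hnd) ?_
    · -- keys stay in step
      by_cases hmem : o.2.2 ∈ d.keys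
      · rw [hkeys, PySem.Set.add_of_mem hmem,
          PySem.Dict.keys_insert_of_contains d _ ((PySem.Dict.contains_iff_mem_keys d _).mpr hmem)]
      · rw [hkeys, PySem.Set.add_of_not_mem hmem,
          PySem.Dict.keys_insert_of_not_contains d _
            (by
              cases h : d.contains o.2.2
              · rfl
              · exact absurd ((PySem.Dict.contains_iff_mem_keys d _).mp h) hmem)]
    · -- the customer-membership invariant
      intro day
      by_cases hday : day = o.2.2
      · subst hday
        rw [PySem.Dict.getD_insert_self d, contains_add_eq]
        by_cases hc : o.1 = customer
        · subst hc
          simp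
        · have h1 : (o.1 == customer) = false := beq_eq_false_iff_ne.mpr hc
          have h2 : (customer == o.1) = false := beq_eq_false_iff_ne.mpr (Ne.symm hc)
          simp only [h1, Bool.false_eq_true, if_false, h2, Bool.false_or]
          exact hcust o.2.2
      · rw [PySem.Dict.getD_insert_of_ne d _ _ hday]
        by_cases hc : (o.1 == customer) = true
        · simp only [hc, if_true, contains_add_eq,
            beq_eq_false_iff_ne.mpr hday, Bool.false_or]
          exact hcust day
        · simp only [Bool.not_eq_true] at hc
          simp only [hc, Bool.false_eq_true, if_false]
          exact hcust day

-- ===== VERDICT (by name: the statement is the Claim_ definition above) =====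
theorem find_days_never_went_spec : Claim_equal_find_days_never_went := by
  intro orders customer _
  unfold Spec_find_days_never_went find_days_never_went find_days_never_went_alt
  exact main_invariant customer orders PySem.Set.empty PySem.Set.empty PySem.Dict.empty rfl
    PySem.Dict.nodup_keys_empty (fun _ => rfl)
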